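-- pv_equiv track=rewrite | github.com/dinoopitstudios/DinoAir | rag/file_chunker.py | _update_string_brace
-- ===== SOURCE A (Python) =====
-- def _update_string_brace(
--     line: str, in_string: bool, string_char: str, brace_count: int
-- ) -> tuple[bool, str, int]:
--     for char in line:
--         if not in_string and char in ("'", '"'):
--             in_string = True
--             string_char = char
--         elif in_string and char == string_char:
--             in_string = False
--         elif not in_string:
--             if char == "{":
--                 brace_count += 1
--             elif char == "}":
--                 brace_count -= 1
--     return in_string, string_char, brace_count
-- ===== SOURCE B (Python) =====
-- def _update_string_brace(
--     line: str, in_string: bool, string_char: str, brace_count: int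
-- ) -> tuple[bool, str, int]:
--     # Two-phase scan: jump between quote positions with str.find instead of
--     # inspecting every character; braces are counted with str.count on the
--     # outside-string segments.
--     rest = line
--     while rest:
--         if in_string:
--             j = rest.find(string_char)
--             if j == -1:
--                 return True, string_char, brace_count
--             in_string = False
--             rest = rest[j + 1:]
--         else:
--             js = rest.find("'")
--             jd = rest.find('"')
--             j = jd if js == -1 else (js if jd == -1 else min(js, jd))
--             seg = rest if j == -1 else rest[:j]
--             brace_count += seg.count("{") - seg.count("}")
--             if j == -1:
--                 return False, string_char, brace_count
--             in_string = True
--             string_char = rest[j]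
--             rest = rest[j + 1:]
--     return in_string, string_char, brace_count
-- ===== Notes on version B (the rewrite author's own statement) =====
-- stated objective: faster
-- what changed: Replaced the per-character state-machine loop with an alternating two-phase scan that jumps between quote positions with str.find and counts braces on whole outside-string segments with str.count (C-speed bulk scans instead of per-character Python bytecode). Pre_ excludes calls that start inside a string whose string_char is not a single character yet occurs as a substring of the line: A's per-character comparison can never match such a malformed string_char, while B's substring find does, so the two defensibly differ only there.
-- outside the precondition, e.g. on _update_string_brace("x'", True, '', 0): A returns (True, '', 0), B returns (True, "'", 0)
import Mathlib
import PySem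

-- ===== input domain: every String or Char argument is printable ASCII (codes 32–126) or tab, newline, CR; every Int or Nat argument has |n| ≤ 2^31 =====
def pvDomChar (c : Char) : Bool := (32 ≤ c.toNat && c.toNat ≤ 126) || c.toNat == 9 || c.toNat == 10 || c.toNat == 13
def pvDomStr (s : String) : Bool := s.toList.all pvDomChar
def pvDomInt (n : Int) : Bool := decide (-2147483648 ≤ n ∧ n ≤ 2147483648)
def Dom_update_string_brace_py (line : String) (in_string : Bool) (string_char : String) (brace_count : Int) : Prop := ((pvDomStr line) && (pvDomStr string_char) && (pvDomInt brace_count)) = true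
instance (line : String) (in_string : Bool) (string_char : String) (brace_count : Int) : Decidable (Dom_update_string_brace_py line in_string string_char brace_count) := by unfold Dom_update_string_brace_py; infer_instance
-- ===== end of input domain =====

-- B replaces A's per-character state machine by an alternating two-phase scan that jumps
-- between quote positions (str.find) and counts braces on whole outside-string segments with str.count (measured faster by a constant factor).


-- ===== PORT A =====
-- one step of A's for-loop: the elif chain on one character, state (in_string, string_char, brace_count)
def pvStepA (st : Bool × String × Int) (c : Char) : Bool × String × Int :=
  if st.1 = false ∧ (c = '\'' ∨ c = '"') then (true, String.ofList [c], st.2.2)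
  else if st.1 = true ∧ String.ofList [c] = st.2.1 then (false, st.2.1, st.2.2)
  else if st.1 = false then
    if c = '{' then (st.1, st.2.1, st.2.2 + 1)
    else if c = '}' then (st.1, st.2.1, st.2.2 - 1)
    else st
  else st

def update_string_brace_py (line : String) (in_string : Bool) (string_char : String) (brace_count : Int) : Bool × String × Int :=
  line.toList.foldl pvStepA (in_string, string_char, brace_count)

-- ===== PORT B =====
-- B's while loop over the remaining suffix `rest`; str.find/str.count/slices are
-- PySem.Chars.find/count and List.take/drop on the character list.
-- `rest[j]` (in range: find succeeded on a nonempty needle) is rest.getD j.toNat ' '.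
def pvGoB (rest : List Char) (in_string : Bool) (string_char : String) (brace_count : Int) : Bool × String × Int :=
  match h : rest with
  | [] => (in_string, string_char, brace_count)
  | _ :: _ =>
    if in_string then
      let j := PySem.Chars.find rest string_char.toList
      if j = -1 then (true, string_char, brace_count)
      else pvGoB (rest.drop (j.toNat + 1)) false string_char brace_count
    else
      let js := PySem.Chars.find rest ['\'']
      let jd := PySem.Chars.find rest ['"']
      let j := if js = -1 then jd else if jd = -1 then js else min js jd
      let seg := if j = -1 then rest else rest.take j.toNat
      -- str.count of a single-character needle is exactly List.count of that character
      let bc := brace_count + (seg.count '{' : Int) - (seg.count '}' : Int)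
      if j = -1 then (false, string_char, bc)
      else pvGoB (rest.drop (j.toNat + 1)) true (String.ofList [rest.getD j.toNat ' ']) bc
  termination_by rest.length
  decreasing_by all_goals (subst h; simp)

def update_string_brace_py_alt (line : String) (in_string : Bool) (string_char : String) (brace_count : Int) : Bool × String × Int :=
  pvGoB line.toList in_string string_char brace_count

-- ===== PRECONDITION & SPEC =====
-- Pre_ excludes calls that start inside a string whose string_char is not a single character yet
-- occurs as a substring of the line: A's per-character comparison can never match such a malformed
-- string_char (A stays in string mode), while B's substring find matches it; both are defensible.
def Pre_update_string_brace_py (line : String) (in_string : Bool) (string_char : String) (brace_count : Int) : Prop :=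
  in_string = true → (string_char.toList.length = 1 ∨ PySem.Str.isIn string_char line = false)
instance (line : String) (in_string : Bool) (string_char : String) (brace_count : Int) : Decidable (Pre_update_string_brace_py line in_string string_char brace_count) := by unfold Pre_update_string_brace_py; infer_instance

def pvWitness_update_string_brace_py : String × Bool × String × Int := ("a = {'x': 1}", true, "'", 0)

def Spec_update_string_brace_py (line : String) (in_string : Bool) (string_char : String) (brace_count : Int) (out : Bool × String × Int) : Prop := out = update_string_brace_py_alt line in_string string_char brace_count
instance (line : String) (in_string : Bool) (string_char : String) (brace_count : Int) (out : Bool × String × Int) : Decidable (Spec_update_string_brace_py line in_string string_char brace_count out) := by unfold Spec_update_string_brace_py; infer_instance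

-- ===== CLAIM (what is proved, stated in full; the proofs are below) =====
def Claim_equal_update_string_brace_py : Prop := ∀ (line : String) (in_string : Bool) (string_char : String) (brace_count : Int), Dom_update_string_brace_py line in_string string_char brace_count → Pre_update_string_brace_py line in_string string_char brace_count → Spec_update_string_brace_py line in_string string_char brace_count (update_string_brace_py line in_string string_char brace_count)

-- ===== LEMMAS AND PROOFS =====

-- [a] is a prefix of l iff l starts with a
theorem pv_prefix_singleton_iff (a : Char) (l : List Char) : [a] <+: l ↔ l[0]? = some a := by
  constructor
  · rintro ⟨t, rfl⟩; simp
  · intro h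
    cases l with
    | nil => simp at h
    | cons x xs => simp at h; subst h; exact ⟨xs, rfl⟩

-- single-character find characterised by indices
theorem pv_find_char (l : List Char) (a : Char) (h : PySem.Chars.find l [a] ≠ -1) :
    ∃ n : Nat, PySem.Chars.find l [a] = (n : Int) ∧ l[n]? = some a ∧ ∀ i < n, l[i]? ≠ some a := by
  have h0 : 0 ≤ PySem.Chars.find l [a] := by
    have := PySem.Chars.neg_one_le_find l [a]; omega
  obtain ⟨hpre, hmin⟩ := PySem.Chars.find_spec h0
  refine ⟨(PySem.Chars.find l [a]).toNat, by omega, ?_, ?_⟩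
  · have := (pv_prefix_singleton_iff a _).1 hpre
    simpa [List.getElem?_drop] using this
  · intro i hi hget
    exact hmin i hi ((pv_prefix_singleton_iff a _).2 (by simpa [List.getElem?_drop] using hget))

theorem pv_find_char_none (l : List Char) (a : Char) :
    PySem.Chars.find l [a] = -1 ↔ a ∉ l := by
  rw [PySem.Chars.find_eq_neg_one_iff, List.singleton_infix_iff]

-- in-string phase of A over characters none of which closes the string
theorem pv_skip_closed (l : List Char) (sc : String) (bc : Int)
    (h : ∀ c ∈ l, String.ofList [c] ≠ sc) :
    l.foldl pvStepA (true, sc, bc) = (true, sc, bc) := by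
  induction l with
  | nil => rfl
  | cons c t ih =>
    have hc := h c (by simp)
    simp only [List.foldl_cons]
    rw [show pvStepA (true, sc, bc) c = (true, sc, bc) by
      simp [pvStepA, hc]]
    exact ih (fun d hd => h d (by simp [hd]))

-- outside-string phase of A over quote-free characters: only braces are counted
theorem pv_scan_open (l : List Char) (sc : String) (bc : Int)
    (h : ∀ c ∈ l, ¬(c = '\'' ∨ c = '"')) :
    l.foldl pvStepA (false, sc, bc) = (false, sc, bc + (l.count '{' : Int) - (l.count '}' : Int)) := by
  induction l generalizing bc with
  | nil => simp
  | cons c t ih =>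
    have hc := h c (by simp)
    have ht : ∀ d ∈ t, ¬(d = '\'' ∨ d = '"') := fun d hd => h d (by simp [hd])
    by_cases h1 : c = '{'
    · subst h1
      simp only [List.foldl_cons]
      rw [show pvStepA (false, sc, bc) '{' = (false, sc, bc + 1) by simp [pvStepA]]
      rw [ih (bc + 1) ht]
      simp
      ring
    · by_cases h2 : c = '}'
      · subst h2
        simp only [List.foldl_cons]
        rw [show pvStepA (false, sc, bc) '}' = (false, sc, bc - 1) by simp [pvStepA]]
        rw [ih (bc - 1) ht]
        simp
        ring
      · simp only [List.foldl_cons]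
        rw [show pvStepA (false, sc, bc) c = (false, sc, bc) by simp [pvStepA, hc, h1, h2]]
        rw [ih bc ht]
        simp [h1, h2]


-- the j computed by B's outside-string phase
def pvJ (l : List Char) : Int :=
  if PySem.Chars.find l ['\''] = -1 then PySem.Chars.find l ['"']
  else if PySem.Chars.find l ['"'] = -1 then PySem.Chars.find l ['\'']
  else min (PySem.Chars.find l ['\'']) (PySem.Chars.find l ['"'])

theorem pv_combined_none (l : List Char) (h : pvJ l = -1) :
    ∀ c ∈ l, ¬(c = '\'' ∨ c = '"') := by
  unfold pvJ at h
  split_ifs at h with h1 h2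
  · intro c hc hcq
    rcases hcq with rfl | rfl
    · exact (pv_find_char_none l '\'').1 h1 hc
    · exact (pv_find_char_none l '"').1 h hc
  · exact absurd h h1
  · have := PySem.Chars.neg_one_le_find l ['\'']
    have := PySem.Chars.neg_one_le_find l ['"']
    have hmin := min_le_left (PySem.Chars.find l ['\'']) (PySem.Chars.find l ['"'])
    have hmin2 := min_le_right (PySem.Chars.find l ['\'']) (PySem.Chars.find l ['"'])
    omega

theorem pv_combined_some (l : List Char) (h : pvJ l ≠ -1) :
    ∃ n : Nat, pvJ l = (n : Int) ∧ ∃ q, l[n]? = some q ∧ (q = '\'' ∨ q = '"') ∧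
      ∀ i < n, ∀ c, l[i]? = some c → ¬(c = '\'' ∨ c = '"') := by
  unfold pvJ at h ⊢
  have mem_of_get : ∀ (i : Nat) (c : Char), l[i]? = some c → c ∈ l := by
    intro i c hic
    obtain ⟨hi, rfl⟩ := List.getElem?_eq_some_iff.1 hic
    exact List.getElem_mem hi
  split_ifs at h ⊢ with h1 h2
  · obtain ⟨n, hn, hq, hbef⟩ := pv_find_char l '"' h
    refine ⟨n, hn, '"', hq, Or.inr rfl, ?_⟩
    intro i hi c hic hcq
    rcases hcq with rfl | rfl
    · exact (pv_find_char_none l '\'').1 h1 (mem_of_get i _ hic)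
    · exact hbef i hi hic
  · obtain ⟨n, hn, hq, hbef⟩ := pv_find_char l '\'' h
    refine ⟨n, hn, '\'', hq, Or.inl rfl, ?_⟩
    intro i hi c hic hcq
    rcases hcq with rfl | rfl
    · exact hbef i hi hic
    · exact (pv_find_char_none l '"').1 h2 (mem_of_get i _ hic)
  · obtain ⟨n1, hn1, hq1, hbef1⟩ := pv_find_char l '\'' h1
    obtain ⟨n2, hn2, hq2, hbef2⟩ := pv_find_char l '"' h2
    rcases Nat.le_total n1 n2 with hle | hlt
    · refine ⟨n1, by rw [hn1, hn2]; omega, '\'', hq1, Or.inl rfl, ?_⟩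
      intro i hi c hic hcq
      rcases hcq with rfl | rfl
      · exact hbef1 i hi hic
      · exact hbef2 i (by omega) hic
    · refine ⟨n2, by rw [hn1, hn2]; omega, '"', hq2, Or.inr rfl, ?_⟩
      intro i hi c hic hcq
      rcases hcq with rfl | rfl
      · exact hbef1 i (by omega) hic
      · exact hbef2 i hi hic

theorem pvGoB_nil (ins : Bool) (sc : String) (bc : Int) : pvGoB [] ins sc bc = (ins, sc, bc) := by
  rw [pvGoB]

theorem pvGoB_cons_true (l : List Char) (hne : l ≠ []) (sc : String) (bc : Int) :
    pvGoB l true sc bc =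
      if PySem.Chars.find l sc.toList = -1 then (true, sc, bc)
      else pvGoB (l.drop ((PySem.Chars.find l sc.toList).toNat + 1)) false sc bc := by
  match l with
  | [] => exact absurd rfl hne
  | r :: rs => rw [pvGoB]; rfl

-- the outside-string segment whose braces B counts
def pvSeg (l : List Char) : List Char := if pvJ l = -1 then l else l.take (pvJ l).toNat

theorem pvGoB_cons_false (l : List Char) (hne : l ≠ []) (sc : String) (bc : Int) :
    pvGoB l false sc bc =
      (if pvJ l = -1 then (false, sc, bc + ((pvSeg l).count '{' : Int) - ((pvSeg l).count '}' : Int))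
       else pvGoB (l.drop ((pvJ l).toNat + 1)) true (String.ofList [l.getD (pvJ l).toNat ' '])
              (bc + ((pvSeg l).count '{' : Int) - ((pvSeg l).count '}' : Int))) := by
  match l with
  | [] => exact absurd rfl hne
  | r :: rs => rw [pvGoB]; rfl

-- elements of l.take n sit at indices below n
theorem pv_mem_take (l : List Char) (n : Nat) (c : Char) (hc : c ∈ l.take n) :
    ∃ i < n, l[i]? = some c := by
  obtain ⟨i, hi, hgi⟩ := List.getElem_of_mem hc
  have hlt : i < n := lt_of_lt_of_le hi (by simp [List.length_take])
  have hil : i < l.length := lt_of_lt_of_le hi (by simp [List.length_take])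
  exact ⟨i, hlt, by rw [List.getElem?_eq_some_iff]; exact ⟨hil, by rw [← List.getElem_take (h := hi)]; exact hgi⟩⟩

theorem pv_main (N : Nat) : ∀ (rest : List Char), rest.length ≤ N → ∀ (ins : Bool) (sc : String) (bc : Int),
    (ins = true → (sc.toList.length = 1 ∨ ¬ sc.toList <:+: rest)) →
    rest.foldl pvStepA (ins, sc, bc) = pvGoB rest ins sc bc := by
  induction N with
  | zero =>
    intro rest hlen ins sc bc _
    have : rest = [] := List.length_eq_zero_iff.1 (Nat.le_zero.1 hlen)
    subst this
    simp [pvGoB_nil]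
  | succ N ih =>
    intro l hlen ins sc bc hyp
    by_cases hne : l = []
    · subst hne; simp [pvGoB_nil]
    · have hlpos : 0 < l.length := List.length_pos_iff.2 hne
      cases ins with
      | true =>
        rw [pvGoB_cons_true l hne]
        rcases hyp rfl with hone | hninf
        · obtain ⟨q, hq⟩ := List.length_eq_one_iff.1 hone
          by_cases hj : PySem.Chars.find l sc.toList = -1
          · rw [if_pos hj]
            refine pv_skip_closed l sc bc ?_
            intro c hc he
            have hsc : sc.toList = [c] := by rw [← he, String.toList_ofList]
            have : c = q := by rw [hq] at hsc; simpa using hsc.symm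
            subst this
            exact (pv_find_char_none l c).1 (by rwa [hq] at hj) hc
          · rw [if_neg hj]
            obtain ⟨n, hn, hqn, hbef⟩ := pv_find_char l q (by rwa [hq] at hj)
            have hnl : n < l.length := (List.getElem?_eq_some_iff.1 hqn).1
            have hdrop : l.drop n = q :: l.drop (n + 1) := by
              rw [List.drop_eq_getElem_cons hnl]
              congr 1
              exact (List.getElem?_eq_some_iff.1 hqn).2
            have hsplit : l = l.take n ++ (q :: l.drop (n + 1)) := by
              rw [← hdrop, List.take_append_drop]
            conv_lhs => rw [hsplit]
            rw [List.foldl_append]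
            rw [pv_skip_closed (l.take n) sc bc ?hskip]
            case hskip =>
              intro c hc he
              obtain ⟨i, hi, hic⟩ := pv_mem_take l n c hc
              have hsc : sc.toList = [c] := by rw [← he, String.toList_ofList]
              have hcq : c = q := by rw [hq] at hsc; simpa using hsc.symm
              exact hbef i hi (by rwa [hcq] at hic)
            rw [List.foldl_cons]
            rw [show pvStepA (true, sc, bc) q = (false, sc, bc) by
              have : String.ofList [q] = sc := by rw [← hq, String.ofList_toList]
              simp [pvStepA, this]]
            have htn : (PySem.Chars.find l sc.toList).toNat = n := by rw [hq, hn]; simp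
            rw [htn]
            refine ih (l.drop (n + 1)) ?_ false sc bc (by simp)
            have := List.length_drop (l := l) (i := n + 1)
            omega
        · have hj : PySem.Chars.find l sc.toList = -1 :=
            (PySem.Chars.find_eq_neg_one_iff l sc.toList).2 hninf
          rw [if_pos hj]
          refine pv_skip_closed l sc bc ?_
          intro c hc he
          have hsc : sc.toList = [c] := by rw [← he, String.toList_ofList]
          exact hninf (by rw [hsc]; exact (List.singleton_infix_iff c l).2 hc)
      | false =>
        rw [pvGoB_cons_false l hne]
        by_cases hj : pvJ l = -1
        · rw [if_pos hj, show pvSeg l = l from by simp [pvSeg, hj]]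
          exact pv_scan_open l sc bc (pv_combined_none l hj)
        · rw [if_neg hj]
          obtain ⟨n, hn, q, hqn, hquote, hbef⟩ := pv_combined_some l hj
          have hnl : n < l.length := (List.getElem?_eq_some_iff.1 hqn).1
          have hdrop : l.drop n = q :: l.drop (n + 1) := by
            rw [List.drop_eq_getElem_cons hnl]
            congr 1
            exact (List.getElem?_eq_some_iff.1 hqn).2
          have hsplit : l = l.take n ++ (q :: l.drop (n + 1)) := by
            rw [← hdrop, List.take_append_drop]
          conv_lhs => rw [hsplit]
          rw [List.foldl_append]
          rw [pv_scan_open (l.take n) sc bc ?hopen]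
          case hopen =>
            intro c hc
            obtain ⟨i, hi, hic⟩ := pv_mem_take l n c hc
            exact hbef i hi c hic
          rw [List.foldl_cons]
          rw [show pvStepA (false, sc, bc + ((l.take n).count '{' : Int) - ((l.take n).count '}' : Int)) q
              = (true, String.ofList [q], bc + ((l.take n).count '{' : Int) - ((l.take n).count '}' : Int)) by
            simp [pvStepA, hquote]]
          have htn : (pvJ l).toNat = n := by rw [hn]; simp
          rw [show pvSeg l = l.take n from by rw [pvSeg, if_neg hj, htn], htn]
          have hgd : l.getD n ' ' = q := by
            rw [List.getD_eq_getElem?_getD, hqn]; rfl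
          rw [hgd]
          refine ih (l.drop (n + 1)) ?_ true (String.ofList [q]) _ ?_
          · have := List.length_drop (l := l) (i := n + 1)
            omega
          · intro _
            left
            simp

-- ===== VERDICT (by name: the statement is the Claim_ definition above) =====
theorem update_string_brace_py_spec : Claim_equal_update_string_brace_py := by
  intro line ins sc bc _hDom hPre
  unfold Spec_update_string_brace_py update_string_brace_py update_string_brace_py_alt
  refine pv_main line.toList.length line.toList le_rfl ins sc bc ?_
  intro hins
  rcases hPre hins with h | h
  · exact Or.inl h
  · right
    intro hinf
    rw [show PySem.Str.isIn sc line = true from ?_] at h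
    · cases h
    · exact (PySem.Str.isIn_iff_infix sc line).2 hinf
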